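-- pv_equiv track=rewrite | github.com/shuvo1165/Problem_Solving_with_Python | led_1168_Beecowrd.py | mymethod
-- ===== SOURCE A (Python) =====
-- def mymethod(digs):                    # get the numbers, need to findout, how many LED required to visualize the each numbers
-- 	lenOfLi = len(digs)
-- 	numOfLed = []
-- 	i = 0
-- 	while i<lenOfLi:
-- 		temp = digs[i]                  # Put immediate value from list in a temporary space
-- 		lenOfDig = len(temp)            # measure the lenth of the value initiate in temp space
-- 		j = 0
-- 		count = 0
-- 		while j<lenOfDig:               # loop for analyse every digit in a number(here numbers in str form)
-- 			if temp[j] == '1':          # The digit '1' needs two LED to visualize, '2' need five LED, '3' need...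
-- 				count +=2
-- 			elif temp[j] == '2':
-- 				count +=5
-- 			elif temp[j] == '3':
-- 				count +=5
-- 			elif temp[j] == '4':
-- 				count +=4
-- 			elif temp[j] == '5':
-- 				count +=5
-- 			elif temp[j] == '6':
-- 				count +=6
-- 			elif temp[j] == '7':
-- 				count +=3
-- 			elif temp[j] == '8':
-- 				count +=7
-- 			elif temp[j] == '9':
-- 				count +=6
-- 			else:
-- 				count +=6
-- 			j+=1
-- 		numOfLed.append(count)
-- 		i+=1
-- 	return numOfLed                   # returning the counted leds for each number given
-- ===== SOURCE B (Python) =====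
-- def mymethod(digs):
--     # Per string: frequency-based closed form instead of a per-character if-chain:
--     # baseline 6 LEDs per character, adjusted by the deltas of the cheap/expensive digits.
--     numOfLed = []
--     for t in digs:
--         numOfLed.append(6 * len(t)
--                         - 4 * t.count('1')
--                         - t.count('2') - t.count('3') - t.count('5')
--                         - 2 * t.count('4')
--                         - 3 * t.count('7')
--                         + t.count('8'))
--     return numOfLed
-- ===== Notes on version B (the rewrite author's own statement) =====
-- stated objective: faster
-- what changed: Replaces the per-character if/elif LED cost scan with a frequency formulation: each string's total is a single arithmetic expression 6*len(t) plus per-digit deltas computed from t.count('1'), ..., t.count('8') (C-level counting instead of a Python-level character loop); characters not listed (including '0','6','9' and non-digits) cost the baseline 6.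
import Mathlib
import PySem

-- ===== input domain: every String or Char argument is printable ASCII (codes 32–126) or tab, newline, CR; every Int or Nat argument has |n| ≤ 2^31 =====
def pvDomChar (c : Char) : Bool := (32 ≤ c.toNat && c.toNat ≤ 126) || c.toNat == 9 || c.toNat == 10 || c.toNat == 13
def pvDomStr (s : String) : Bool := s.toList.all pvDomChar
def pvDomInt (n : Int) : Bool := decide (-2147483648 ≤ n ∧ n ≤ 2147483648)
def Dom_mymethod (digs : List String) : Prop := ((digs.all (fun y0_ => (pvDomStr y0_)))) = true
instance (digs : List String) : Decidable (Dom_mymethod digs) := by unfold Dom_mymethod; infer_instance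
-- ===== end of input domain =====

-- B replaces A's per-character if/elif scan by a per-string arithmetic formula over
-- character frequencies (baseline 6 per character plus per-digit deltas via t.count).


-- ===== PORT A =====
-- inner while loop of A: scan the characters, adding the LED cost of each via the if/elif chain
def ledScanA : List Char → Int → Int
  | [], count => count
  | c :: rest, count =>
      ledScanA rest (count +
        (if c = '1' then 2
         else if c = '2' then 5
         else if c = '3' then 5
         else if c = '4' then 4
         else if c = '5' then 5
         else if c = '6' then 6
         else if c = '7' then 3
         else if c = '8' then 7
         else if c = '9' then 6
         else 6))

def mymethod (digs : List String) : List Int :=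
  digs.map (fun temp => ledScanA temp.toList 0)

-- ===== PORT B =====
-- per-string closed form over character frequencies, as in Source B
def ledFormulaB (t : String) : Int :=
  6 * PySem.Str.len t
    - 4 * (PySem.Str.count t "1" : Int)
    - (PySem.Str.count t "2" : Int) - (PySem.Str.count t "3" : Int) - (PySem.Str.count t "5" : Int)
    - 2 * (PySem.Str.count t "4" : Int)
    - 3 * (PySem.Str.count t "7" : Int)
    + (PySem.Str.count t "8" : Int)

def mymethod_alt (digs : List String) : List Int :=
  digs.map ledFormulaB

-- ===== PRECONDITION & SPEC =====
def Spec_mymethod (digs : List String) (out : List Int) : Prop := out = mymethod_alt digs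
instance (digs : List String) (out : List Int) : Decidable (Spec_mymethod digs out) := by unfold Spec_mymethod; infer_instance

-- ===== CLAIM (what is proved, stated in full; the proofs are below) =====
def Claim_equal_mymethod : Prop := ∀ (digs : List String), Dom_mymethod digs → Spec_mymethod digs (mymethod digs)

-- ===== LEMMAS AND PROOFS =====

-- s.count(c) for a single character counts the occurrences of that character
theorem chars_count_go_singleton (c : Char) (fuel : Nat) (l : List Char) (acc : Nat)
    (h : l.length ≤ fuel) :
    PySem.Chars.count.go [c] fuel l acc = acc + l.count c := by
  induction fuel generalizing l acc with
  | zero => cases l with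
    | nil => simp [PySem.Chars.count.go]
    | cons a t => simp at h
  | succ n ih => cases l with
    | nil => simp [PySem.Chars.count.go]
    | cons a t =>
      simp at h
      rw [PySem.Chars.count.go]
      by_cases hc : c = a
      · subst hc; simp [List.isPrefixOf, ih _ _ h]; omega
      · simp [List.isPrefixOf, Ne.symm hc, hc, ih _ _ h]

theorem chars_count_singleton (l : List Char) (c : Char) :
    PySem.Chars.count l [c] = l.count c := by
  simp [PySem.Chars.count, chars_count_go_singleton c l.length l 0 le_rfl]

-- A's scan, in closed form over character counts
set_option maxHeartbeats 1600000 in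
theorem ledScanA_eq (l : List Char) (acc : Int) :
    ledScanA l acc =
      acc + 6 * l.length - 4 * l.count '1'
        - l.count '2' - l.count '3' - l.count '5'
        - 2 * l.count '4' - 3 * l.count '7' + l.count '8' := by
  induction l generalizing acc with
  | nil => simp [ledScanA]
  | cons c rest ih =>
    have step : ledScanA (c :: rest) acc = ledScanA rest (acc +
        (if c = '1' then 2
         else if c = '2' then 5
         else if c = '3' then 5
         else if c = '4' then 4
         else if c = '5' then 5
         else if c = '6' then 6
         else if c = '7' then 3
         else if c = '8' then 7
         else if c = '9' then 6
         else 6)) := rfl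
    rw [step, ih]
    simp only [List.length_cons, List.count_cons, beq_iff_eq]
    push_cast
    split_ifs <;> first | omega | (exfalso; simp_all)

theorem str_count_single (t : String) (c : Char) (s : String) (hs : s.toList = [c]) :
    PySem.Str.count t s = t.toList.count c := by
  rw [PySem.Str.count_eq, hs, chars_count_singleton]

theorem perString (t : String) : ledScanA t.toList 0 = ledFormulaB t := by
  simp only [ledFormulaB, PySem.Str.len_eq,
    str_count_single t '1' "1" rfl, str_count_single t '2' "2" rfl,
    str_count_single t '3' "3" rfl, str_count_single t '4' "4" rfl,
    str_count_single t '5' "5" rfl, str_count_single t '7' "7" rfl,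
    str_count_single t '8' "8" rfl]
  rw [ledScanA_eq]
  ring

-- ===== VERDICT (by name: the statement is the Claim_ definition above) =====
theorem mymethod_spec : Claim_equal_mymethod := by
  intro digs _
  unfold Spec_mymethod mymethod mymethod_alt
  exact List.map_congr_left (fun t _ => perString t)
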